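-- pv_equiv track=rewrite | github.com/Fatalynxz/Meryl-System | app_modules/shared/app_helpers.py | normalize_promotion_type
-- ===== SOURCE A (Python) =====
-- def normalize_promotion_type(discount_type):
--     normalized = str(discount_type or "").strip().lower().replace("-", "_").replace(" ", "_")
--     alias_groups = {
--         "percentage": {"percentage", "percentage_discount", "flash_sale", "seasonal_sale"},
--         "fixed": {"fixed", "fixed_amount", "clearance_sale", "markdown_sale"},
--         "bogo": {"bogo", "buy_one_get_one", "bundle_deal"},
--     }
--     for base_type, aliases in alias_groups.items():
--         if normalized in aliases:
--             return base_type
--     return normalized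
-- ===== SOURCE B (Python) =====
-- # B: binary search over one flat alias table kept sorted by alias; the per-call
-- # scan of alias groups with set-membership tests is replaced by a hand-written
-- # lo/hi bisection plus a single equality check (alternative search strategy).
-- _TABLE = [
--     ("bogo", "bogo"),
--     ("bundle_deal", "bogo"),
--     ("buy_one_get_one", "bogo"),
--     ("clearance_sale", "fixed"),
--     ("fixed", "fixed"),
--     ("fixed_amount", "fixed"),
--     ("flash_sale", "percentage"),
--     ("markdown_sale", "fixed"),
--     ("percentage", "percentage"),
--     ("percentage_discount", "percentage"),
--     ("seasonal_sale", "percentage"),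
-- ]
--
--
-- def _lookup(normalized):
--     lo, hi = 0, len(_TABLE)
--     while lo < hi:
--         mid = (lo + hi) // 2
--         if _TABLE[mid][0] < normalized:
--             lo = mid + 1
--         else:
--             hi = mid
--     if lo < len(_TABLE) and _TABLE[lo][0] == normalized:
--         return _TABLE[lo][1]
--     return normalized
--
--
-- def normalize_promotion_type(discount_type):
--     normalized = str(discount_type or "").strip().lower().replace("-", "_").replace(" ", "_")
--     return _lookup(normalized)
-- ===== Notes on version B (the rewrite author's own statement) =====
-- stated objective: alternative
-- what changed: The per-call scan over three alias groups with set-membership tests is replaced by a hand-written lo/hi binary search over one flat alias table kept sorted by alias, followed by a single equality check; the normalization chain is unchanged.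
import Mathlib
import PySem

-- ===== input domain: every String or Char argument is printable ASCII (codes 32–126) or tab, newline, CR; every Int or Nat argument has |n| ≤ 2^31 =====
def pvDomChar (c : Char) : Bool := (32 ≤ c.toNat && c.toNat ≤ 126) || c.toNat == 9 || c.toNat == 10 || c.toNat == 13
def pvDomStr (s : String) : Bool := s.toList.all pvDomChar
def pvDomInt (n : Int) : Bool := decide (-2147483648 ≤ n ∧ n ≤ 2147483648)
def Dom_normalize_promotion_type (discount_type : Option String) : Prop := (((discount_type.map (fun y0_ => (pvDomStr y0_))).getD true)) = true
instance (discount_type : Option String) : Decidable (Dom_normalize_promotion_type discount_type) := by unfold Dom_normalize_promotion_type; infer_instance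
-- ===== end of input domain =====

-- B replaces A's scan over alias groups by a binary search in one sorted flat alias table (alternative).

-- ===== PORT A =====
-- loop over the alias groups in order: first group containing `normalized` wins
def nptGroupLoop (normalized : String) : List (String × PySem.Set String) → String
  | [] => normalized
  | (base_type, aliases) :: rest =>
      if PySem.Set.contains aliases normalized then base_type
      else nptGroupLoop normalized rest

def normalize_promotion_type (discount_type : Option String) : String :=
  let normalized := PySem.Str.replace (PySem.Str.replace (PySem.Str.lower
    (PySem.Str.strip (discount_type.getD ""))) "-" "_") " " "_"
  let alias_groups : List (String × PySem.Set String) :=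
    [("percentage", PySem.Set.ofList ["percentage", "percentage_discount", "flash_sale", "seasonal_sale"]),
     ("fixed", PySem.Set.ofList ["fixed", "fixed_amount", "clearance_sale", "markdown_sale"]),
     ("bogo", PySem.Set.ofList ["bogo", "buy_one_get_one", "bundle_deal"])]
  nptGroupLoop normalized alias_groups

-- ===== PORT B =====
-- flat (alias, base) table, sorted by alias (Source B's _TABLE)
def nptTable : List (String × String) :=
  [("bogo", "bogo"), ("bundle_deal", "bogo"), ("buy_one_get_one", "bogo"),
   ("clearance_sale", "fixed"), ("fixed", "fixed"), ("fixed_amount", "fixed"),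
   ("flash_sale", "percentage"), ("markdown_sale", "fixed"),
   ("percentage", "percentage"), ("percentage_discount", "percentage"),
   ("seasonal_sale", "percentage")]

-- the while-loop of Source B's _lookup, with a fuel argument (initial hi - lo) as the
-- structural-termination guard; the getD default is unreachable (lo ≤ mid < hi ≤ len)
def nptBisectGo (normalized : String) : Nat → Nat → Nat → Nat
  | 0, lo, _ => lo
  | fuel + 1, lo, hi =>
      if lo < hi then
        let mid := (lo + hi) / 2
        if PySem.Chars.strLt (nptTable.getD mid ("", "")).1.toList normalized.toList then nptBisectGo normalized fuel (mid + 1) hi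
        else nptBisectGo normalized fuel lo mid
      else lo

def nptBisect (normalized : String) (lo hi : Nat) : Nat :=
  nptBisectGo normalized (hi - lo) lo hi

-- Source B's _lookup: bisect, then one equality check
def nptLookup (normalized : String) : String :=
  let lo := nptBisect normalized 0 nptTable.length
  if h : lo < nptTable.length then
    if nptTable[lo].1 == normalized then nptTable[lo].2 else normalized
  else normalized

def normalize_promotion_type_alt (discount_type : Option String) : String :=
  let normalized := PySem.Str.replace (PySem.Str.replace (PySem.Str.lower
    (PySem.Str.strip (discount_type.getD ""))) "-" "_") " " "_"
  nptLookup normalized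

-- ===== PRECONDITION & SPEC =====
def Spec_normalize_promotion_type (discount_type : Option String) (out : String) : Prop := out = normalize_promotion_type_alt discount_type
instance (discount_type : Option String) (out : String) : Decidable (Spec_normalize_promotion_type discount_type out) := by unfold Spec_normalize_promotion_type; infer_instance

-- ===== CLAIM =====
def Claim_equal_normalize_promotion_type : Prop := ∀ (discount_type : Option String), Dom_normalize_promotion_type discount_type → Spec_normalize_promotion_type discount_type (normalize_promotion_type discount_type)

-- ===== LEMMAS AND PROOFS =====
-- if n matches no alias in the table, the final equality check fails and _lookup returns n
lemma nptLookup_not_mem (n : String) (hmem : ∀ p ∈ nptTable, p.1 ≠ n) :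
    nptLookup n = n := by
  unfold nptLookup
  by_cases h : nptBisect n 0 nptTable.length < nptTable.length
  · have hne := hmem nptTable[nptBisect n 0 nptTable.length] (List.getElem_mem h)
    simp [h, hne]
  · simp [h]

-- core fact: A's group loop and B's binary-search lookup agree on every string
set_option maxHeartbeats 2000000 in
lemma npt_core (n : String) :
    nptGroupLoop n
      [("percentage", PySem.Set.ofList ["percentage", "percentage_discount", "flash_sale", "seasonal_sale"]),
       ("fixed", PySem.Set.ofList ["fixed", "fixed_amount", "clearance_sale", "markdown_sale"]),
       ("bogo", PySem.Set.ofList ["bogo", "buy_one_get_one", "bundle_deal"])]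
      = nptLookup n := by
  by_cases hmem : n ∈ ["percentage", "percentage_discount", "flash_sale", "seasonal_sale",
      "fixed", "fixed_amount", "clearance_sale", "markdown_sale",
      "bogo", "buy_one_get_one", "bundle_deal"]
  · fin_cases hmem <;> decide
  · simp only [List.mem_cons, List.not_mem_nil, or_false, not_or] at hmem
    obtain ⟨h1, h2, h3, h4, h5, h6, h7, h8, h9, h10, h11⟩ := hmem
    rw [nptLookup_not_mem n (by intro p hp; fin_cases hp <;> simp_all [@eq_comm String])]
    simp only [nptGroupLoop, PySem.Set.contains, PySem.Set.ofList, List.contains, List.foldl]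
    split_ifs <;> simp_all [@eq_comm String]

-- ===== VERDICT =====
theorem normalize_promotion_type_spec : Claim_equal_normalize_promotion_type := by
  intro discount_type _
  unfold Spec_normalize_promotion_type normalize_promotion_type normalize_promotion_type_alt
  exact npt_core _
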